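-- pv_equiv track=rewrite | github.com/rhkrdudrb/py | 연습.py | solution
-- ===== SOURCE A (Python) =====
-- def solution(k, m, score):
--     answer = 0
--     score.sort(reverse=True) # 외우다 보니 계속 까먹음 기억하기
--     arry=[]
--     for i in range(0,len(score),m):
--         arry.append(score[i:i+m])
--     for num in arry:
--         if len(num) == m:
--             answer += min(num) * len(num)
--     return answer
-- ===== SOURCE B (Python) =====
-- def solution(k, m, score):
--     score.sort(reverse=True)
--     return m * sum(score[j] for j in range(m - 1, len(score), m))
-- ===== Notes on version B (the rewrite author's own statement) =====
-- stated objective: simpler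
-- what changed: Instead of materialising a list of m-sized chunks and taking min() of each full chunk, B sorts descending in place and sums the elements at the group-ending indices m-1, 2m-1, ... in a single stride pass, multiplying the sum by m (each full descending chunk's minimum is its last element).
import Mathlib
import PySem

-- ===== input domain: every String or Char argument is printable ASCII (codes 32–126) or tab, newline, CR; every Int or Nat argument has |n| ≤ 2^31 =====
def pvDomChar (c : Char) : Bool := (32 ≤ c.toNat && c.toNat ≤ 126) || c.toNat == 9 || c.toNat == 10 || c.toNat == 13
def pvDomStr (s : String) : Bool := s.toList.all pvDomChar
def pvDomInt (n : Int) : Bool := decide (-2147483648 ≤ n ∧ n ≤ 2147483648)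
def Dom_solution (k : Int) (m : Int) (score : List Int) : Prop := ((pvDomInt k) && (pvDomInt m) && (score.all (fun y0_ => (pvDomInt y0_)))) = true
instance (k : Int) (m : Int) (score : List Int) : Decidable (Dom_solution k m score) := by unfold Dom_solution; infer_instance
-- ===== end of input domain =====

-- B sums the group-ending elements of the descending sort in one stride pass instead of
-- building chunk lists and taking min of each (simpler; equivalence is about the return
-- value — both Pythons sort `score` in place, the same observable mutation).

-- ===== PORT A =====
def solution (k : Int) (m : Int) (score : List Int) : Int :=
  let answer : Int := 0
  let s : List Int := PySem.List.sorted score (fun x => x) true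
  let arry : List (List Int) :=
    (PySem.List.pyRange 0 (s.length : Int) m).foldl
      (fun arry i => arry ++ [PySem.List.slice s (some i) (some (i + m))]) []
  arry.foldl
    (fun answer num =>
      if (num.length : Int) = m then
        answer + ((PySem.List.min? num (fun x => x)).getD 0) * (num.length : Int)
      else answer) answer

-- ===== PORT B =====
def solution_alt (k : Int) (m : Int) (score : List Int) : Int :=
  let s : List Int := PySem.List.sorted score (fun x => x) true
  m * (PySem.List.pyRange (m - 1) (s.length : Int) m).foldl
        (fun acc j => acc + PySem.List.pyGetD s j 0) 0

-- ===== PRECONDITION & SPEC =====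
-- Pre_ excludes exactly m = 0, where both Pythons raise ValueError (range() with step 0).
def Pre_solution (k : Int) (m : Int) (score : List Int) : Prop := m ≠ 0
instance (k : Int) (m : Int) (score : List Int) : Decidable (Pre_solution k m score) := by unfold Pre_solution; infer_instance
def pvWitness_solution : Int × Int × List Int := (1, 2, [3, 1, 2, 4])

def Spec_solution (k : Int) (m : Int) (score : List Int) (out : Int) : Prop := out = solution_alt k m score
instance (k : Int) (m : Int) (score : List Int) (out : Int) : Decidable (Spec_solution k m score out) := by unfold Spec_solution; infer_instance

-- ===== CLAIM (what is proved, stated in full; the proofs are below) =====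
def Claim_equal_solution : Prop := ∀ (k : Int) (m : Int) (score : List Int), Dom_solution k m score → Pre_solution k m score → Spec_solution k m score (solution k m score)

-- ===== LEMMAS AND PROOFS =====

-- min of a nonempty descending-sorted list is its last element
lemma minval_desc (c : List Int) (hne : 0 < c.length)
    (hp : c.Pairwise (fun a b : Int => b ≤ a)) :
    (PySem.List.min? c (fun x => x)).getD 0 = getElem c (c.length - 1) (by omega) := by
  have h0 : c ≠ [] := by rintro rfl; simp at hne
  obtain ⟨v, hv⟩ : ∃ v, PySem.List.min? c (fun x => x) = some v := by
    cases h : PySem.List.min? c (fun x => x) with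
    | none => exact absurd ((PySem.List.min?_eq_none_iff c _).mp h) h0
    | some v => exact ⟨v, rfl⟩
  rw [hv, Option.getD_some]
  have hmem := PySem.List.min?_mem hv
  obtain ⟨i, hi, hiv⟩ := List.mem_iff_getElem.mp hmem
  have hmin := PySem.List.min?_isMin hv
  have hle : v ≤ getElem c (c.length - 1) (by omega) :=
    hmin _ (List.getElem_mem _)
  rcases eq_or_lt_of_le (Nat.le_sub_one_of_lt hi) with he | hlt
  · subst he; exact hiv.symm
  · have h2 := List.pairwise_iff_getElem.mp hp i (c.length - 1) hi (by omega) hlt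
    rw [hiv] at h2
    exact le_antisymm hle h2

-- negative step, nonnegative span: empty range
lemma pyRange_neg_empty (a b st : Int) (hst : st < 0) (hab : a ≤ b) :
    PySem.List.pyRange a b st = [] := by
  simp [PySem.List.pyRange, hst.ne, not_lt.mpr hab, not_lt.mpr hst.le]

-- the main sum identity on the sorted list
lemma main_sum (mn : Nat) (hm : 0 < mn) (s : List Int)
    (hs : s.Pairwise (fun a b : Int => b ≤ a)) :
    List.foldl
      (fun (answer : Int) (num : List Int) =>
        if (num.length : Int) = (mn : Int) then
          answer + ((PySem.List.min? num (fun x => x)).getD 0) * (num.length : Int)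
        else answer) 0
      ((PySem.List.pyRange 0 (s.length : Int) (mn : Int)).foldl
        (fun arry i => arry ++ [PySem.List.slice s (some i) (some (i + (mn : Int)))]) [])
    = (mn : Int) * (PySem.List.pyRange ((mn : Int) - 1) (s.length : Int) (mn : Int)).foldl
        (fun acc j => acc + PySem.List.pyGetD s j 0) 0 := by
  have hmz : (0:Int) < (mn : Int) := by exact_mod_cast hm
  rw [PySem.List.foldl_append_singleton_eq_map, List.nil_append]
  have hfun : (fun (answer : Int) (num : List Int) =>
        if (num.length : Int) = (mn : Int) then
          answer + ((PySem.List.min? num (fun x => x)).getD 0) * (num.length : Int)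
        else answer)
      = (fun (answer : Int) (num : List Int) =>
          answer + (if (num.length : Int) = (mn : Int) then
            ((PySem.List.min? num (fun x => x)).getD 0) * (num.length : Int) else 0)) := by
    funext a num; split_ifs <;> simp
  rw [hfun, PySem.List.foldl_add, PySem.List.foldl_add,
      PySem.List.pyRange_of_pos _ _ hmz, PySem.List.pyRange_of_pos _ _ hmz,
      List.map_map, List.map_map, List.map_map]
  set n := s.length with hn
  set q := n / mn with hq
  -- the B-side count is exactly q
  have hB : (if ((mn : Int) - 1) < (n : Int) then
        (((n : Int) - ((mn : Int) - 1) + (mn : Int) - 1) / (mn : Int)).toNat else 0) = q := by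
    split_ifs with h
    · rw [show ((n : Int) - ((mn : Int) - 1) + (mn : Int) - 1) = (n : Int) by ring]
      rfl
    · rw [hq, Nat.div_eq_of_lt (by omega)]
  -- the A-side count is at least q
  set cntA := (if (0:Int) < (n : Int) then (((n : Int) - 0 + (mn : Int) - 1) / (mn : Int)).toNat else 0)
    with hcntA
  have hA : q ≤ cntA := by
    rw [hcntA]
    split_ifs with h
    · have h1 : (n : Int) / (mn : Int) ≤ ((n : Int) - 0 + (mn : Int) - 1) / (mn : Int) :=
        Int.ediv_le_ediv hmz (by omega)
      calc q = ((n : Int) / (mn : Int)).toNat := rfl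
        _ ≤ _ := Int.toNat_le_toNat h1
    · have : n = 0 := by omega
      simp [hq, this]
  rw [hB, show cntA = q + (cntA - q) from (Nat.add_sub_cancel' hA).symm,
      List.range_add, List.map_append, List.sum_append]
  -- facts about q
  have hdm : mn * q + n % mn = n := by rw [hq]; exact Nat.div_add_mod n mn
  have hmod := Nat.mod_lt n hm
  -- tail sum is zero: those chunks are not full
  have htail : ∀ x ∈ List.map
      (((fun num => if (num.length : Int) = (mn : Int) then
          (PySem.List.min? num (fun y => y)).getD 0 * (num.length : Int) else 0) ∘
        fun i => PySem.List.slice s (some i) (some (i + (mn : Int)))) ∘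
        fun (k : Nat) => 0 + (mn : Int) * (k : Int))
      (List.map (fun (x : Nat) => q + x) (List.range (cntA - q))), x = 0 := by
    intro x hx
    simp only [List.map_map, List.mem_map] at hx
    obtain ⟨u, _, rfl⟩ := hx
    simp only [Function.comp]
    have e1 : (0:Int) + (mn : Int) * ((q + u : Nat) : Int) = ((mn * (q + u) : Nat) : Int) := by
      push_cast; ring
    rw [e1, PySem.List.slice_natCast_add]
    rw [if_neg]
    have e2 : mn * (q + u) = mn * q + mn * u := by ring
    have hlen : (((s.drop (mn * (q + u))).take mn).length) = min mn (n - mn * (q + u)) := by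
      simp [List.length_take, List.length_drop, ← hn]
    rw [hlen]
    intro hcon
    have : min mn (n - mn * (q + u)) = mn := by exact_mod_cast hcon
    omega
  rw [List.sum_eq_zero htail, add_zero]
  -- head: full chunks, min = last element of the chunk
  have hhead : ∀ t ∈ List.range q,
      (((fun num => if (num.length : Int) = (mn : Int) then
          (PySem.List.min? num (fun y => y)).getD 0 * (num.length : Int) else 0) ∘
        fun i => PySem.List.slice s (some i) (some (i + (mn : Int)))) ∘
        fun (k : Nat) => 0 + (mn : Int) * (k : Int)) t
      = (mn : Int) * (((fun j => PySem.List.pyGetD s j 0) ∘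
          fun (k : Nat) => (mn : Int) - 1 + (mn : Int) * (k : Int)) t) := by
    intro t ht
    have ht' : t < q := List.mem_range.mp ht
    have hfull : mn * t + mn ≤ n := by
      have h1 : (t + 1) * mn ≤ n := (Nat.le_div_iff_mul_le hm).mp (by omega)
      have h2 : (t + 1) * mn = mn * t + mn := by ring
      omega
    simp only [Function.comp]
    have e1 : (0:Int) + (mn : Int) * (t : Int) = ((mn * t : Nat) : Int) := by push_cast; ring
    rw [e1, PySem.List.slice_natCast_add]
    have hlen : (((s.drop (mn * t)).take mn).length) = mn := by
      simp [List.length_take, List.length_drop, ← hn]; omega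
    rw [if_pos (by exact_mod_cast congrArg (Nat.cast : Nat → Int) hlen)]
    rw [minval_desc _ (by omega) (List.Pairwise.sublist
          ((List.take_sublist _ _).trans (List.drop_sublist _ _)) hs)]
    have e2 : ((mn - 1 + mn * t : Nat) : Int) = (mn : Int) - 1 + (mn : Int) * (t : Int) := by
      push_cast [Nat.cast_sub (by omega : 1 ≤ mn)]; ring
    rw [← e2, PySem.List.pyGetD_natCast, List.getD_eq_getElem s 0 (by omega : mn - 1 + mn * t < n)]
    simp only [hlen]
    rw [List.getElem_take, List.getElem_drop]
    rw [getElem_congr rfl (by omega : mn * t + (mn - 1) = mn - 1 + mn * t) (by omega)]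
    ring
  rw [List.map_congr_left hhead]
  rw [show (fun t => (mn : Int) * (((fun j => PySem.List.pyGetD s j 0) ∘
          fun (k : Nat) => (mn : Int) - 1 + (mn : Int) * (k : Int)) t))
      = (fun t => (mn : Int) * ((fun j => PySem.List.pyGetD s j 0) ∘
          fun (k : Nat) => (mn : Int) - 1 + (mn : Int) * (k : Int)) t) from rfl,
      PySem.List.sum_map_const_mul_int]
  ring

-- ===== VERDICT (by name: the statement is the Claim_ definition above) =====
theorem solution_spec : Claim_equal_solution := by
  intro k m score _ hpre
  unfold Spec_solution solution solution_alt
  dsimp only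
  rcases lt_trichotomy m 0 with hm | hm | hm
  · rw [pyRange_neg_empty _ _ _ hm (by positivity),
        pyRange_neg_empty _ _ _ hm (by omega)]
    simp
  · exact absurd hm hpre
  · obtain ⟨mn, rfl⟩ : ∃ mn : Nat, m = (mn : Int) := ⟨m.toNat, (Int.toNat_of_nonneg hm.le).symm⟩
    exact main_sum mn (by exact_mod_cast hm) _ (PySem.List.sorted_pairwise_rev score _)
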